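-- pv_equiv track=rewrite | github.com/Danielbunckenburg/DMA | Problemset_1/Assignment_2.1.py | check
-- ===== SOURCE A (Python) =====
-- def check(A, lo, hi):
--     if lo >= hi:
--         return True  # Base case: A single element or empty subarray is trivially sorted
--
--     mid = (lo + hi) // 2  # Compute the middle index
--     success = True
--
--     # Check if all elements in the left half are <= A[mid]
--     for i in range(lo, mid):
--         if A[i] > A[mid]:
--             success = False
--             break
--
--     # Check if all elements in the right half are >= A[mid]
--     for i in range(mid + 1, hi + 1):
--         if A[i] < A[mid]:
--             success = False
--             break
--
--     # Recursively check the left and right halves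
--     if lo < mid and success:
--         success = check(A, lo, mid - 1)
--     if mid + 1 < hi and success:
--         success = check(A, mid + 1, hi)
--
--     return success
-- ===== SOURCE B (Python) =====
-- def check(A, lo, hi):
--     # single forward pass with early exit: the subarray is sorted iff no adjacent descent
--     i = lo
--     while i < hi:
--         if A[i] > A[i + 1]:
--             return False
--         i += 1
--     return True
-- ===== Notes on version B (the rewrite author's own statement) =====
-- stated objective: simpler
-- what changed: Replaces A's divide-and-conquer recursion (compare both halves against the midpoint, then recurse on each half) by a single iterative forward pass that returns False at the first adjacent descent.
-- outside the precondition, e.g. on check([0, 0, 0, 5, 1], 0, 7): A returns False, B returns False; on check([2, 1], 0, 3): A raises IndexError, B returns False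
import Mathlib
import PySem

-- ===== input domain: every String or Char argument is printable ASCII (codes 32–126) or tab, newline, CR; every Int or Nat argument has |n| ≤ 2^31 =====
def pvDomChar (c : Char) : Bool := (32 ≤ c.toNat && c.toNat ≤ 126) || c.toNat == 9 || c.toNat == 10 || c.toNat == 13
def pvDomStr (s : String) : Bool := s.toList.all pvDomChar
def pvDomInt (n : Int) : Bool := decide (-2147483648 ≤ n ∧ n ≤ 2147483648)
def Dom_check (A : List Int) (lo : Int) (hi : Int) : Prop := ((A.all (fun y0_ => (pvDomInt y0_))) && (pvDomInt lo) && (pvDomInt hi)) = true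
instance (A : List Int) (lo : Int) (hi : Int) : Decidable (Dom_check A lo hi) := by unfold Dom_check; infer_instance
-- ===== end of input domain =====

-- B replaces A's divide-and-conquer recursion by a single iterative forward pass with early exit (simpler).

-- ===== PORT A =====
-- first for-loop of A: break (return false) at the first left element above A[mid]
def checkLeftLoop (A : List Int) (m : Int) : List Int → Bool
  | [] => true
  | i :: rest =>
    if PySem.List.pyGetD A i 0 > PySem.List.pyGetD A m 0 then false
    else checkLeftLoop A m rest

-- second for-loop of A: break (return false) at the first right element below A[mid]
def checkRightLoop (A : List Int) (m : Int) : List Int → Bool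
  | [] => true
  | i :: rest =>
    if PySem.List.pyGetD A i 0 < PySem.List.pyGetD A m 0 then false
    else checkRightLoop A m rest

def check (A : List Int) (lo : Int) (hi : Int) : Bool :=
  if _h : lo ≥ hi then true
  else
    let mid := PySem.Int.floordiv (lo + hi) 2
    let success := checkLeftLoop A mid (PySem.List.pyRange lo mid 1)
    let success := success && checkRightLoop A mid (PySem.List.pyRange (mid + 1) (hi + 1) 1)
    let success := if lo < mid && success then check A lo (mid - 1) else success
    let success := if mid + 1 < hi && success then check A (mid + 1) hi else success
    success
termination_by (hi - lo).toNat
decreasing_by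
  · have h2 := PySem.Int.floordiv_two_mid_bounds (lo := lo) (hi := hi) (by omega)
    omega
  · have h2 := PySem.Int.floordiv_two_mid_bounds (lo := lo) (hi := hi) (by omega)
    omega

-- ===== PORT B =====
-- B's while-loop: advance i, return false at the first adjacent descent
def altLoop (A : List Int) (i : Int) (hi : Int) : Bool :=
  if _h : i < hi then
    if PySem.List.pyGetD A i 0 > PySem.List.pyGetD A (i + 1) 0 then false
    else altLoop A (i + 1) hi
  else true
termination_by (hi - i).toNat
decreasing_by omega

def check_alt (A : List Int) (lo : Int) (hi : Int) : Bool := altLoop A lo hi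

-- ===== PRECONDITION & SPEC =====
-- Pre_ excludes lo < hi with an index range reaching outside the list's (negative-index) bounds,
-- where both Pythons generally raise IndexError (on a few such inputs A still returns False after an early break).
def Pre_check (A : List Int) (lo : Int) (hi : Int) : Prop :=
  lo ≥ hi ∨ (-(A.length : Int) ≤ lo ∧ hi < (A.length : Int))
instance (A : List Int) (lo : Int) (hi : Int) : Decidable (Pre_check A lo hi) := by unfold Pre_check; infer_instance
def pvWitness_check : List Int × Int × Int := ([1, 2, 2, 3], 0, 3)

def Spec_check (A : List Int) (lo : Int) (hi : Int) (out : Bool) : Prop := out = check_alt A lo hi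
instance (A : List Int) (lo : Int) (hi : Int) (out : Bool) : Decidable (Spec_check A lo hi out) := by unfold Spec_check; infer_instance

-- ===== CLAIM (what is proved, stated in full; the proofs are below) =====
def Claim_equal_check : Prop := ∀ (A : List Int) (lo : Int) (hi : Int), Dom_check A lo hi → Pre_check A lo hi → Spec_check A lo hi (check A lo hi)

-- ===== LEMMAS AND PROOFS =====

-- the common value function both ports read the list through
def pvV (A : List Int) (i : Int) : Int := PySem.List.pyGetD A i 0

-- "sorted on [lo, hi]": no adjacent descent among indices lo..hi-1
def pvSorted (A : List Int) (lo hi : Int) : Prop :=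
  ∀ j : Int, lo ≤ j → j < hi → pvV A j ≤ pvV A (j + 1)

theorem altLoop_iff (A : List Int) (i hi : Int) :
    altLoop A i hi = true ↔ pvSorted A i hi := by
  by_cases h : i < hi
  · rw [altLoop]
    simp only [dif_pos h]
    split_ifs with hgt
    · simp only [false_iff]
      intro hs
      exact absurd (hs i le_rfl h) (by simpa [pvV] using hgt)
    · rw [altLoop_iff A (i + 1) hi]
      constructor
      · intro hs j hj1 hj2
        rcases eq_or_lt_of_le hj1 with rfl | hlt
        · simpa [pvV] using le_of_not_gt hgt
        · exact hs j (by omega) hj2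
      · intro hs j hj1 hj2
        exact hs j (by omega) hj2
  · rw [altLoop]
    simp only [dif_neg h, true_iff]
    intro j hj1 hj2
    omega
termination_by (hi - i).toNat
decreasing_by omega

theorem checkLeftLoop_iff (A : List Int) (m : Int) (l : List Int) :
    checkLeftLoop A m l = true ↔ ∀ i ∈ l, pvV A i ≤ pvV A m := by
  induction l with
  | nil => simp [checkLeftLoop]
  | cons a rest ih =>
    simp only [checkLeftLoop]
    split_ifs with hgt
    · simp only [false_iff]
      intro hs
      exact absurd (hs a (by simp)) (by simpa [pvV] using hgt)
    · rw [ih]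
      constructor
      · intro hs i hi
        rcases List.mem_cons.mp hi with rfl | hmem
        · simpa [pvV] using le_of_not_gt hgt
        · exact hs i hmem
      · intro hs i hi
        exact hs i (List.mem_cons_of_mem _ hi)

theorem checkRightLoop_iff (A : List Int) (m : Int) (l : List Int) :
    checkRightLoop A m l = true ↔ ∀ i ∈ l, pvV A m ≤ pvV A i := by
  induction l with
  | nil => simp [checkRightLoop]
  | cons a rest ih =>
    simp only [checkRightLoop]
    split_ifs with hlt
    · simp only [false_iff]
      intro hs
      exact absurd (hs a (by simp)) (by simpa [pvV] using hlt)
    · rw [ih]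
      constructor
      · intro hs i hi
        rcases List.mem_cons.mp hi with rfl | hmem
        · simpa [pvV] using not_lt.mp hlt
        · exact hs i hmem
      · intro hs i hi
        exact hs i (List.mem_cons_of_mem _ hi)

-- sortedness gives monotonicity on the interval
theorem pvSorted_mono (A : List Int) (lo hi : Int) (hs : pvSorted A lo hi) :
    ∀ a b : Int, lo ≤ a → a ≤ b → b ≤ hi → pvV A a ≤ pvV A b := by
  intro a b ha hab hb
  have key : ∀ n : Nat, ∀ b : Int, b - a = n → lo ≤ a → a ≤ b → b ≤ hi → pvV A a ≤ pvV A b := by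
    intro n
    induction n with
    | zero =>
      intro b hn _ _ _
      have hba : b = a := by omega
      rw [hba]

    | succ k ih =>
      intro b hn h1 h2 h3
      have hb1 : pvV A a ≤ pvV A (b - 1) := ih (b - 1) (by omega) h1 (by omega) (by omega)
      have : pvV A (b - 1) ≤ pvV A b := by
        have := hs (b - 1) (by omega) (by omega)
        simpa using this
      omega
  exact key (b - a).toNat b (by omega) ha hab hb

-- restricting a sorted interval
theorem pvSorted_sub (A : List Int) (lo hi lo' hi' : Int) (hs : pvSorted A lo hi)
    (h1 : lo ≤ lo') (h2 : hi' ≤ hi) : pvSorted A lo' hi' := by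
  intro j hj1 hj2
  exact hs j (by omega) (by omega)

-- peel one 'if p && s then r else s' step of A's success updates
theorem pvStepTrue {p s r : Bool} (h : (if p && s then r else s) = true) :
    s = true ∧ (p = true → r = true) := by
  cases p <;> cases s <;> simp_all

-- A's divide-and-conquer computes exactly sortedness of the index window
theorem check_iff (A : List Int) (lo hi : Int) :
    check A lo hi = true ↔ pvSorted A lo hi := by
  by_cases h : lo ≥ hi
  · rw [check]
    simp only [dif_pos h, true_iff]
    intro j hj1 hj2
    omega
  · obtain ⟨mid, hm⟩ : ∃ m, PySem.Int.floordiv (lo + hi) 2 = m := ⟨_, rfl⟩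
    have hmid : lo ≤ mid ∧ mid ≤ hi := by
      have := PySem.Int.floordiv_two_mid_bounds (lo := lo) (hi := hi) (by omega)
      omega
    have hmidlt : mid < hi := by
      have := (PySem.Int.floordiv_lt_iff_lt_mul (a := lo + hi) (b := 2) (q := hi) (by omega)).mpr (by omega)
      omega
    have ihL := check_iff A lo (mid - 1)
    have ihR := check_iff A (mid + 1) hi
    rw [check]
    simp only [dif_neg h, hm]
    constructor
    · intro hres
      obtain ⟨h3, h4⟩ := pvStepTrue hres
      obtain ⟨h12, h3'⟩ := pvStepTrue h3
      rw [Bool.and_eq_true] at h12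
      obtain ⟨c1, c2⟩ := h12
      rw [checkLeftLoop_iff] at c1
      rw [checkRightLoop_iff] at c2
      intro j hj1 hj2
      rcases lt_trichotomy j (mid - 1) with hc | hc | hc
      · -- strictly inside the left half: from the left recursion
        have hsl := ihL.mp (h3' (decide_eq_true (by omega : lo < mid)))
        exact hsl j hj1 (by omega)
      · -- j = mid - 1: from the first loop
        have hv := c1 (mid - 1) (by rw [PySem.List.mem_pyRange_one]; omega)
        rw [hc]
        have e : mid - 1 + 1 = mid := by omega
        rw [e]
        exact hv
      · rcases eq_or_lt_of_le (show mid ≤ j by omega) with hc2 | hc2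
        · -- j = mid: from the second loop
          have hv := c2 (mid + 1) (by rw [PySem.List.mem_pyRange_one]; omega)
          rw [← hc2]
          exact hv
        · -- strictly inside the right half: from the right recursion
          have hsr := ihR.mp (h4 (decide_eq_true (by omega : mid + 1 < hi)))
          exact hsr j (by omega) hj2
    · intro hs
      have c1 : checkLeftLoop A mid (PySem.List.pyRange lo mid 1) = true := by
        rw [checkLeftLoop_iff]
        intro i hi'
        rw [PySem.List.mem_pyRange_one] at hi'
        exact pvSorted_mono A lo hi hs i mid (by omega) (by omega) (by omega)
      have c2 : checkRightLoop A mid (PySem.List.pyRange (mid + 1) (hi + 1) 1) = true := by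
        rw [checkRightLoop_iff]
        intro i hi'
        rw [PySem.List.mem_pyRange_one] at hi'
        exact pvSorted_mono A lo hi hs mid i (by omega) (by omega) (by omega)
      have c3 : check A lo (mid - 1) = true :=
        ihL.mpr (pvSorted_sub A lo hi lo (mid - 1) hs le_rfl (by omega))
      have c4 : check A (mid + 1) hi = true :=
        ihR.mpr (pvSorted_sub A lo hi (mid + 1) hi hs (by omega) le_rfl)
      rw [c1, c2]
      simp only [Bool.and_true]
      by_cases g1 : lo < mid <;> by_cases g2 : mid + 1 < hi <;>
        simp [g1, g2, c3, c4]
termination_by (hi - lo).toNat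
decreasing_by
  · omega
  · omega

-- ===== VERDICT (by name: the statement is the Claim_ definition above) =====
theorem check_spec : Claim_equal_check := by
  intro A lo hi _ _
  unfold Spec_check check_alt
  have h1 := check_iff A lo hi
  have h2 := altLoop_iff A lo hi
  by_cases hs : pvSorted A lo hi
  · rw [h1.mpr hs, (h2.mpr hs)]
  · have e1 : check A lo hi = false := by
      cases hb : check A lo hi
      · rfl
      · exact absurd (h1.mp hb) hs
    have e2 : altLoop A lo hi = false := by
      cases hb : altLoop A lo hi
      · rfl
      · exact absurd (h2.mp hb) hs
    rw [e1, e2]
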